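-- pv_equiv track=rewrite | github.com/shiningsurya/asgard | python/CandidateCoincide.py | FigureAnt
-- ===== SOURCE A (Python) =====
-- def FigureAnt(li, et):
--     '''
--     To help me figure out antenna stuff
--     from endtimes
--
--     Arguments
--     ---------
--     li : list of indices
--     et : dictionary
--
--     Returns
--     -------
--     list of antennas
--     '''
--     ret = []
--     for si in li:
--         # one index
--         for ant, endindex in et.items():
--             if si > endindex:
--                 si -= endindex
--                 continue
--             else:
--                 ret.append(ant)
--                 break
--     return ret
-- ===== SOURCE B (Python) =====
-- def FigureAnt(li, et):
--     # Compute each antenna's cumulative end position once, then map every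
--     # index to the first antenna whose cumulative end reaches it.
--     bounds = []
--     total = 0
--     for end in et.values():
--         total += end
--         bounds.append(total)
--     ants = list(et)
--     ret = []
--     for si in li:
--         j = next((j for j, b in enumerate(bounds) if si <= b), None)
--         if j is not None:
--             ret.append(ants[j])
--     return ret
-- ===== Notes on version B (the rewrite author's own statement) =====
-- stated objective: alternative
-- what changed: Replaces A's per-index scan that mutates a running remainder over the dict by cumulative end positions computed once, mapping each index to the first antenna whose cumulative end reaches it.
import Mathlib
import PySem

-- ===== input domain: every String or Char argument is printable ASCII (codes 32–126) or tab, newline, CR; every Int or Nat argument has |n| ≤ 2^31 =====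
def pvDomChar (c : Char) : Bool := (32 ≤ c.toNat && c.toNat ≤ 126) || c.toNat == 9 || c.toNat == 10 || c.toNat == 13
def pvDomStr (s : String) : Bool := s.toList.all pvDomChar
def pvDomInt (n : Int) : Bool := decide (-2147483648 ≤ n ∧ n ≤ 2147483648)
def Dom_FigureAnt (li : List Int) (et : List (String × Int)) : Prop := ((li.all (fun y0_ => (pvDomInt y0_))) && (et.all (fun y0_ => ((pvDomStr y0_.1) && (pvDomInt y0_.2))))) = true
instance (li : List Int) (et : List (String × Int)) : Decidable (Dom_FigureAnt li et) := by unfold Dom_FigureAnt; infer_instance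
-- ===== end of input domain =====

-- B replaces A's per-index mutating remainder scan by cumulative end positions
-- computed once, mapping each index to the first antenna whose cumulative end
-- reaches it (objective: alternative decomposition, same asymptotic cost).

-- ===== PORT A =====
-- inner 'for ant, endindex in et.items()' loop of A for one index si
def innerA (si : Int) : List (String × Int) → List String
  | [] => []
  | (ant, e) :: rest => if si > e then innerA (si - e) rest else [ant]

def FigureAnt (li : List Int) (et : List (String × Int)) : List String :=
  li.foldl (fun ret si => ret ++ innerA si et) []

-- ===== PORT B =====
-- first loop of Source B: 'total += end; bounds.append(total)' over et.values()
def buildBounds : List (String × Int) → Int → List Int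
  | [], _ => []
  | (_, e) :: rest, total => (total + e) :: buildBounds rest (total + e)

-- 'next((j for j, b in enumerate(bounds) if si <= b), None)'
def firstGe (si : Int) : List Int → Option Nat
  | [] => none
  | b :: rest => if si ≤ b then some 0 else (firstGe si rest).map (· + 1)

def FigureAnt_alt (li : List Int) (et : List (String × Int)) : List String :=
  let bounds := buildBounds et 0
  let ants := et.map Prod.fst
  li.foldl (fun ret si =>
    match firstGe si bounds with
    | some j => ret ++ [ants.getD j ""]   -- j is an enumerate index of bounds, so it is in range and getD is exact
    | none => ret) []

-- ===== PRECONDITION & SPEC =====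
def Spec_FigureAnt (li : List Int) (et : List (String × Int)) (out : List String) : Prop := out = FigureAnt_alt li et
instance (li : List Int) (et : List (String × Int)) (out : List String) : Decidable (Spec_FigureAnt li et out) := by unfold Spec_FigureAnt; infer_instance

-- ===== CLAIM (what is proved, stated in full; the proofs are below) =====
def Claim_equal_FigureAnt : Prop := ∀ (li : List Int) (et : List (String × Int)), Dom_FigureAnt li et → Spec_FigureAnt li et (FigureAnt li et)

-- ===== LEMMAS AND PROOFS =====

-- A's inner remainder loop equals B's first-reaching-bound lookup, generalized
-- over the running total: the remainder after j subtractions is si minus the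
-- j-th partial sum, so 'remainder ≤ e_j' is exactly 'si + total ≤ bounds[j]'.
theorem innerA_eq_lookup (et : List (String × Int)) : ∀ (si total : Int),
    innerA si et =
      (match firstGe (si + total) (buildBounds et total) with
       | some j => [(et.map Prod.fst).getD j ""]
       | none => []) := by
  induction et with
  | nil => intro si total; simp [innerA, buildBounds, firstGe]
  | cons h t ih =>
      intro si total
      obtain ⟨a, e⟩ := h
      simp only [innerA, buildBounds, firstGe, List.map_cons]
      by_cases hc : si > e
      · rw [if_pos hc, if_neg (by omega : ¬ si + total ≤ total + e)]
        have := ih (si - e) (total + e)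
        rw [show si - e + (total + e) = si + total by ring] at this
        rw [this]
        cases firstGe (si + total) (buildBounds t (total + e)) with
        | none => simp
        | some j => simp
      · rw [if_neg hc, if_pos (by omega : si + total ≤ total + e)]
        simp

-- ===== VERDICT (by name: the statement is the Claim_ definition above) =====
theorem FigureAnt_spec : Claim_equal_FigureAnt := by
  intro li et _
  unfold Spec_FigureAnt FigureAnt FigureAnt_alt
  simp only []
  suffices h : ∀ (xs : List Int) (acc : List String),
      List.foldl (fun ret si => ret ++ innerA si et) acc xs =
      List.foldl (fun ret si =>
        match firstGe si (buildBounds et 0) with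
        | some j => ret ++ [(et.map Prod.fst).getD j ""]
        | none => ret) acc xs from h li []
  intro xs
  induction xs with
  | nil => intro acc; rfl
  | cons x t ih =>
      intro acc
      simp only [List.foldl_cons]
      have hx := innerA_eq_lookup et x 0
      rw [Int.add_zero] at hx
      rw [hx]
      cases firstGe x (buildBounds et 0) with
      | none => simp only [List.append_nil]; exact ih acc
      | some j => exact ih _
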